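-- pv_equiv track=rewrite | github.com/Daharen/Opening_Trainer | src/opening_trainer/opponent.py | _extract_int_from_diagnostic
-- ===== SOURCE A (Python) =====
-- def _extract_int_from_diagnostic(diagnostic: str | None, key: str, default: int) -> int:
--     if not diagnostic:
--         return default
--     prefix = f"{key}="
--     for part in diagnostic.split(";"):
--         token = part.strip()
--         if not token.startswith(prefix):
--             continue
--         value = token.removeprefix(prefix)
--         try:
--             return int(value)
--         except ValueError:
--             return default
--     return default
-- ===== SOURCE B (Python) =====
-- def _extract_int_from_diagnostic(diagnostic: str | None, key: str, default: int) -> int: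
--     if not diagnostic:
--         return default
--     table = {}
--     for part in diagnostic.split(";"):
--         token = part.strip()
--         i = token.find("=")
--         if i >= 0 and token[:i] not in table:
--             table[token[:i]] = token[i + 1:]
--     if key not in table:
--         return default
--     try:
--         return int(table[key])
--     except ValueError:
--         return default
-- ===== Notes on version B (the rewrite author's own statement) =====
-- stated objective: idiomatic
-- what changed: Replaces A's scan for the first token matching 'key=' with one parse of the whole diagnostic into a first-wins dict (each token split at its first '=') followed by a single lookup and int() conversion.
-- outside the precondition, e.g. on _extract_int_from_diagnostic('a=b=5', 'a=b', 0): A returns 5, B returns 0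
import Mathlib
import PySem

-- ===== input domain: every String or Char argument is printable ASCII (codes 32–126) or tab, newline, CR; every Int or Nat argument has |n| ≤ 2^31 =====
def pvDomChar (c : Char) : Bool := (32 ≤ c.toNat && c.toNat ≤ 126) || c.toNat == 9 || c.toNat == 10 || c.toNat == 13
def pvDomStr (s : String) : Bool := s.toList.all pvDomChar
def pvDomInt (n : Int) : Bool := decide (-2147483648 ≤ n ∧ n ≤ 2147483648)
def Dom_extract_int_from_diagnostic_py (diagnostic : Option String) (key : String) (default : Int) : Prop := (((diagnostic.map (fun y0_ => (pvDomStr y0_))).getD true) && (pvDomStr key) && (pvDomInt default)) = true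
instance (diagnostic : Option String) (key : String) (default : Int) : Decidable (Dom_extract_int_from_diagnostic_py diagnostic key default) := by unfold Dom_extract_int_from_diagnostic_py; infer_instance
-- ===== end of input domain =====

-- B replaces A's scan for the first prefix-matching token with an idiomatic single parse of the
-- whole diagnostic into a first-wins dict (split each token at its first '=') followed by one lookup.

-- ===== PORT A =====
-- removeprefix ported by hand (not in PySem): drop the prefix exactly when present — exact Python semantics
def pyRemoveprefix (s p : String) : String :=
  if PySem.Str.startswith s p then PySem.Str.slice s (some (PySem.Str.len p)) none else s

def extractLoopA (pre : String) (default : Int) : List String → Int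
  | [] => default
  | part :: rest =>
    let token := PySem.Str.strip part
    if PySem.Str.startswith token pre then
      match PySem.Int.ofStr? (pyRemoveprefix token pre) with
      | some v => v
      | none => default
    else extractLoopA pre default rest

def extract_int_from_diagnostic_py (diagnostic : Option String) (key : String) (default : Int) : Int :=
  match diagnostic with
  | none => default
  | some d =>
    if d = "" then default
    else extractLoopA (key ++ "=") default ((PySem.Str.split? d ";").getD [])
      -- split? is `some` here: the separator ";" is nonempty

-- ===== PORT B =====
def extractStepB (m : PySem.Dict String String) (part : String) : PySem.Dict String String :=
  let token := PySem.Str.strip part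
  let i := PySem.Str.find token "="
  if 0 ≤ i ∧ m.contains (PySem.Str.slice token none (some i)) = false then
    m.insert (PySem.Str.slice token none (some i)) (PySem.Str.slice token (some (i + 1)) none)
  else m

def extractFinishB (key : String) (default : Int) (m : PySem.Dict String String) : Int :=
  match m.get? key with
  | none => default
  | some v =>
    match PySem.Int.ofStr? v with
    | some n => n
    | none => default

def extract_int_from_diagnostic_py_alt (diagnostic : Option String) (key : String) (default : Int) : Int :=
  match diagnostic with
  | none => default
  | some d =>
    if d = "" then default
    else extractFinishB key default
      (((PySem.Str.split? d ";").getD []).foldl extractStepB PySem.Dict.empty)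

-- ===== PRECONDITION & SPEC =====
-- Pre_ excludes keys containing '=' (a malformed query for a ';'-separated k=v string): there A's raw
-- prefix match and B's split-at-the-first-'=' parse are both defensible readings and can disagree.
def Pre_extract_int_from_diagnostic_py (diagnostic : Option String) (key : String) (default : Int) : Prop :=
  '=' ∉ key.toList
instance (diagnostic : Option String) (key : String) (default : Int) : Decidable (Pre_extract_int_from_diagnostic_py diagnostic key default) := by unfold Pre_extract_int_from_diagnostic_py; infer_instance

def pvWitness_extract_int_from_diagnostic_py : Option String × String × Int := (some "depth=3; seldepth=5", "depth", 0)

def Spec_extract_int_from_diagnostic_py (diagnostic : Option String) (key : String) (default : Int) (out : Int) : Prop := out = extract_int_from_diagnostic_py_alt diagnostic key default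
instance (diagnostic : Option String) (key : String) (default : Int) (out : Int) : Decidable (Spec_extract_int_from_diagnostic_py diagnostic key default out) := by unfold Spec_extract_int_from_diagnostic_py; infer_instance

-- ===== CLAIM (what is proved, stated in full; the proofs are below) =====
def Claim_equal_extract_int_from_diagnostic_py : Prop := ∀ (diagnostic : Option String) (key : String) (default : Int), Dom_extract_int_from_diagnostic_py diagnostic key default → Pre_extract_int_from_diagnostic_py diagnostic key default → Spec_extract_int_from_diagnostic_py diagnostic key default (extract_int_from_diagnostic_py diagnostic key default)

-- ===== LEMMAS AND PROOFS =====

-- a one-character list is a prefix iff it is the first element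
lemma singleton_prefix_iff (c : Char) (l : List Char) : [c] <+: l ↔ l[0]? = some c := by
  cases l with
  | nil => simp
  | cons x xs =>
    constructor
    · rintro ⟨t, ht⟩; cases ht; simp
    · intro h; simp at h; exact ⟨xs, by simp [h]⟩

-- if token = k ++ "=" ++ …  and k has no '=', the first '=' of token sits right after k
lemma find_eq_of_prefix (t k : List Char) (hk : '=' ∉ k) (h : (k ++ ['=']) <+: t) :
    PySem.Chars.find t ['='] = (k.length : Int) := by
  obtain ⟨u, hu⟩ := h
  subst hu
  have hnn : 0 ≤ PySem.Chars.find (k ++ ['='] ++ u) ['='] := by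
    rw [PySem.Chars.find_nonneg_iff]
    exact ⟨k, u, by simp⟩
  obtain ⟨hpre, hmin⟩ := PySem.Chars.find_spec hnn
  set j := (PySem.Chars.find (k ++ ['='] ++ u) ['=']).toNat with hj
  have hle : j ≤ k.length := by
    by_contra hgt
    exact hmin k.length (by omega) ⟨u, by simp⟩
  have hjk : j = k.length := by
    rcases Nat.lt_or_ge j k.length with hlt | hge
    · exfalso
      rw [singleton_prefix_iff, List.getElem?_drop, Nat.add_zero, List.append_assoc,
        List.getElem?_append_left hlt] at hpre
      exact hk (List.mem_of_getElem? hpre)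
    · omega
  omega

-- conversely: a nonnegative find whose left part equals k forces the prefix
lemma prefix_of_find (t k : List Char) (hf : 0 ≤ PySem.Chars.find t ['='])
    (htake : t.take (PySem.Chars.find t ['=']).toNat = k) : (k ++ ['=']) <+: t := by
  obtain ⟨hpre, _⟩ := PySem.Chars.find_spec hf
  set j := (PySem.Chars.find t ['=']).toNat
  rw [singleton_prefix_iff, List.getElem?_drop, Nat.add_zero] at hpre
  have hj : j < t.length := (List.getElem?_eq_some_iff.mp hpre).1
  rw [List.getElem?_eq_getElem hj, Option.some.injEq] at hpre
  refine ⟨t.drop (j + 1), ?_⟩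
  rw [← htake, List.append_assoc]
  have hd : ['='] ++ t.drop (j + 1) = t.drop j := by
    rw [List.drop_eq_getElem_cons hj, hpre]; rfl
  rw [hd, List.take_append_drop]

-- the key priming facts about one stripped token, at the String level
lemma token_match_iff (token key : String) (hk : '=' ∉ key.toList) :
    PySem.Str.startswith token (key ++ "=") = true ↔
      (0 ≤ PySem.Str.find token "=" ∧ PySem.Str.slice token none (some (PySem.Str.find token "=")) = key) := by
  have htl : (key ++ "=").toList = key.toList ++ ['='] := by simp
  rw [PySem.Str.startswith_eq, PySem.Chars.startswith_iff, htl, PySem.Str.find_eq]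
  have hfe : ("=" : String).toList = ['='] := by decide
  rw [hfe]
  constructor
  · intro h
    have hf := find_eq_of_prefix token.toList key.toList hk h
    refine ⟨by rw [hf]; positivity, ?_⟩
    rw [← String.toList_inj, PySem.Str.toList_slice, PySem.Chars.slice_eq_listSlice,
      PySem.List.slice_to token.toList (by rw [hf]; positivity), hf]
    obtain ⟨u, hu⟩ := h
    rw [← hu]
    simp
  · rintro ⟨hf, hsl⟩
    apply prefix_of_find
    · exact hf
    · rw [← String.toList_inj, PySem.Str.toList_slice, PySem.Chars.slice_eq_listSlice,
        PySem.List.slice_to token.toList hf] at hsl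
      exact hsl

-- when the token matches, A's removeprefix value equals B's stored value
lemma values_agree (token key : String) (hk : '=' ∉ key.toList)
    (h : PySem.Str.startswith token (key ++ "=") = true) :
    pyRemoveprefix token (key ++ "=") = PySem.Str.slice token (some (PySem.Str.find token "=" + 1)) none := by
  have hfe : ("=" : String).toList = ['='] := by decide
  have htl : (key ++ "=").toList = key.toList ++ ['='] := by simp
  have hpref : (key.toList ++ ['=']) <+: token.toList := by
    rw [PySem.Str.startswith_eq, PySem.Chars.startswith_iff, htl] at h
    exact h
  have hf : PySem.Str.find token "=" = (key.toList.length : Int) := by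
    rw [PySem.Str.find_eq, hfe]
    exact find_eq_of_prefix token.toList key.toList hk hpref
  rw [pyRemoveprefix, if_pos h, ← String.toList_inj]
  rw [PySem.Str.toList_slice, PySem.Str.toList_slice, PySem.Chars.slice_eq_listSlice,
    PySem.Chars.slice_eq_listSlice, hf]
  have hlen : PySem.Str.len (key ++ "=") = ((key.toList.length : Int) + 1) := by
    rw [PySem.Str.len_eq]
    simp
  rw [hlen]

-- main loop invariant: finishing B's fold equals (prior binding if any, else A's scan)
lemma loop_invariant (key : String) (default : Int) (hk : '=' ∉ key.toList) :
    ∀ (parts : List String) (m : PySem.Dict String String),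
      extractFinishB key default (parts.foldl extractStepB m) =
        match m.get? key with
        | some v => extractFinishB key default m
        | none => extractLoopA (key ++ "=") default parts := by
  intro parts
  induction parts with
  | nil =>
    intro m
    cases hm : m.get? key with
    | none => simp [extractFinishB, extractLoopA, hm]
    | some v => simp
  | cons part rest ih =>
    intro m
    simp only [List.foldl_cons, extractLoopA]
    set token := PySem.Str.strip part with htok
    by_cases hmatch : PySem.Str.startswith token (key ++ "=") = true
    · -- the token matches A's prefix: its left part IS key
      obtain ⟨hf, hsl⟩ := (token_match_iff token key hk).mp hmatch
      by_cases hin : m.contains (PySem.Str.slice token none (some (PySem.Str.find token "="))) = false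
      · -- fresh key: B inserts (key ↦ value); afterwards the binding is fixed
        have hstep : extractStepB m part =
            m.insert key (PySem.Str.slice token (some (PySem.Str.find token "=" + 1)) none) := by
          rw [extractStepB]
          simp only [← htok]
          rw [if_pos ⟨hf, hin⟩, hsl]
        rw [hstep, ih]
        have hget : (m.insert key (PySem.Str.slice token (some (PySem.Str.find token "=" + 1)) none)).get? key =
            some (PySem.Str.slice token (some (PySem.Str.find token "=" + 1)) none) :=
          PySem.Dict.get?_insert_self ..
        have hmk : m.get? key = none := by
          rw [hsl] at hin
          rw [← Option.not_isSome_iff_eq_none, ← PySem.Dict.contains_eq_isSome_get?, hin]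
          simp
        simp only [hget, hmk]
        rw [if_pos hmatch, extractFinishB, hget, values_agree token key hk hmatch]
      · -- key already bound: B keeps the old binding; A's earlier scan already decided too
        have hstep : extractStepB m part = m := by
          rw [extractStepB]
          simp only [← htok]
          rw [if_neg]
          rintro ⟨_, hc⟩
          exact absurd hc hin
        rw [hstep, ih]
        have hmk : (m.get? key).isSome = true := by
          rw [← PySem.Dict.contains_eq_isSome_get?]
          rw [hsl] at hin
          simpa using hin
        obtain ⟨v, hv⟩ := Option.isSome_iff_exists.mp hmk
        simp [hv]
    · -- the token does not match A's prefix: A skips; B's insert (if any) is under a key ≠ key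
      have hstep : (extractStepB m part).get? key = m.get? key := by
        rw [extractStepB]
        simp only [← htok]
        split
        · next hcond =>
          obtain ⟨hf, _⟩ := hcond
          have hne : key ≠ PySem.Str.slice token none (some (PySem.Str.find token "=")) := by
            intro he
            exact hmatch ((token_match_iff token key hk).mpr ⟨hf, he.symm⟩)
          exact PySem.Dict.get?_insert_of_ne _ _ hne
        · rfl
      have hfin : extractFinishB key default (extractStepB m part) = extractFinishB key default m := by
        rw [extractFinishB, extractFinishB, hstep]
      rw [ih]
      cases hm : m.get? key with
      | some v =>
        have : (extractStepB m part).get? key = some v := by rw [hstep, hm]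
        simp only [this, hfin]
      | none =>
        have : (extractStepB m part).get? key = none := by rw [hstep, hm]
        simp only [this]
        rw [if_neg hmatch]

-- ===== VERDICT (by name: the statement is the Claim_ definition above) =====
theorem extract_int_from_diagnostic_py_spec : Claim_equal_extract_int_from_diagnostic_py := by
  intro diagnostic key default _ hpre
  unfold Spec_extract_int_from_diagnostic_py
  cases diagnostic with
  | none => rfl
  | some d =>
    unfold extract_int_from_diagnostic_py extract_int_from_diagnostic_py_alt
    by_cases hd : d = ""
    · simp [hd]
    · simp only [if_neg hd]
      rw [loop_invariant key default hpre]
      rw [PySem.Dict.get?_empty]
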